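-- pv_equiv track=rewrite | github.com/ManjaKang/TIL | Problem/D3/전기버스.py | cal_interval2
-- ===== SOURCE A (Python) =====
-- def cal_interval2(li, k):
--     i = 0
--     while i < len(li)-1:
--         if (li[i]+li[i+1]) <= k:
--             li[i] = li[i] + li[i+1]
--             li.pop(i+1)
--         else:
--             i += 1
--     return li
-- ===== SOURCE B (Python) =====
-- def cal_interval2(li, k):
--     # Single pass with a running accumulator (A mutates li in place; B builds a
--     # new list -- the equivalence claimed is about the return value only).
--     if not li:
--         return []
--     out = []
--     cur = li[0]
--     for x in li[1:]:
--         if cur + x <= k: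
--             cur += x
--         else:
--             out.append(cur)
--             cur = x
--     out.append(cur)
--     return out
-- ===== Notes on version B (the rewrite author's own statement) =====
-- stated objective: faster
-- what changed: Replaced the index-and-pop while loop (each merge does an O(n) list.pop) by a single left-to-right pass that keeps a running accumulator and appends a finished group when the next element would overflow k.
import Mathlib
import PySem

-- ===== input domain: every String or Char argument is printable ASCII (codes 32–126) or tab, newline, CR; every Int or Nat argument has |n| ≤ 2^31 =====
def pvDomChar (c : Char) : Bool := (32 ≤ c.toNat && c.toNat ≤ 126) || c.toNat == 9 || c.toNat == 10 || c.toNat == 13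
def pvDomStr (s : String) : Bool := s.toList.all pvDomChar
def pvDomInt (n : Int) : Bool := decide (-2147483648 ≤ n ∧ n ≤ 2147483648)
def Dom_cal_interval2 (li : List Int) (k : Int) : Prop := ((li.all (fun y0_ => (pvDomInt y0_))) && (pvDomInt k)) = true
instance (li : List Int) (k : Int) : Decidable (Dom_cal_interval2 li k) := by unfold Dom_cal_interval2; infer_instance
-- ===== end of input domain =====

-- B replaces A's quadratic index-and-pop merging loop by a linear single pass with a
-- running accumulator (A mutates li in place; equivalence is about the return value).


-- ===== PORT A =====
-- A's while loop over the mutable list: state is (li, i); li[i], li[i+1] are in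
-- range when i < len(li)-1, so getD is exact; li.pop(i+1) is eraseIdx, the
-- assignment is List.set.
def calLoopA (li : List Int) (i : Nat) (k : Int) : List Int :=
  if h : i < li.length - 1 then
    if li.getD i 0 + li.getD (i+1) 0 ≤ k then
      calLoopA ((li.set i (li.getD i 0 + li.getD (i+1) 0)).eraseIdx (i+1)) i k
    else
      calLoopA li (i+1) k
  else li
termination_by li.length - i
decreasing_by
  · have hl : i + 1 < li.length := by omega
    simp [List.length_eraseIdx, List.length_set, hl]
    omega
  · omega

def cal_interval2 (li : List Int) (k : Int) : List Int := calLoopA li 0 k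

-- ===== PORT B =====
-- B's for loop: out is the accumulator of finished groups, cur the running sum.
def calLoopB (rest : List Int) (k : Int) (out : List Int) (cur : Int) : List Int :=
  match rest with
  | [] => out ++ [cur]
  | y :: ys =>
    if cur + y ≤ k then calLoopB ys k out (cur + y)
    else calLoopB ys k (out ++ [cur]) y

def cal_interval2_alt (li : List Int) (k : Int) : List Int :=
  match li with
  | [] => []
  | x :: xs => calLoopB xs k [] x

-- ===== PRECONDITION & SPEC =====
def Spec_cal_interval2 (li : List Int) (k : Int) (out : List Int) : Prop := out = cal_interval2_alt li k
instance (li : List Int) (k : Int) (out : List Int) : Decidable (Spec_cal_interval2 li k out) := by unfold Spec_cal_interval2; infer_instance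

-- ===== CLAIM (what is proved, stated in full; the proofs are below) =====
def Claim_equal_cal_interval2 : Prop := ∀ (li : List Int) (k : Int), Dom_cal_interval2 li k → Spec_cal_interval2 li k (cal_interval2 li k)

-- ===== LEMMAS AND PROOFS =====

theorem pv_getD_append (pre l : List Int) (n : Nat) :
    (pre ++ l).getD (pre.length + n) 0 = l.getD n 0 := by
  induction pre with
  | nil => simp
  | cons a t ih => simpa [Nat.succ_add] using ih

theorem pv_set_append (pre rest : List Int) (c v : Int) :
    (pre ++ c :: rest).set pre.length v = pre ++ v :: rest := by
  induction pre with
  | nil => simp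
  | cons a t ih => simp [ih]

theorem pv_eraseIdx_append (pre rest : List Int) (a b : Int) :
    (pre ++ a :: b :: rest).eraseIdx (pre.length + 1) = pre ++ a :: rest := by
  induction pre with
  | nil => simp
  | cons x t ih => simp only [List.cons_append, List.length_cons, List.eraseIdx_cons_succ, ih]

theorem pv_loop_eq (k : Int) (rest : List Int) :
    ∀ (pre : List Int) (cur : Int),
      calLoopA (pre ++ cur :: rest) pre.length k = calLoopB rest k pre cur := by
  induction rest with
  | nil =>
    intro pre cur
    rw [calLoopA, calLoopB]
    have hno : ¬ pre.length < (pre ++ [cur]).length - 1 := by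
      simp
    rw [dif_neg hno]
  | cons y ys ih =>
    intro pre cur
    rw [calLoopA]
    have hlen : pre.length < (pre ++ cur :: y :: ys).length - 1 := by
      simp [List.length_append]
    rw [dif_pos hlen]
    have h1 : (pre ++ cur :: y :: ys).getD pre.length 0 = cur := by
      simpa using pv_getD_append pre (cur :: y :: ys) 0
    have h2 : (pre ++ cur :: y :: ys).getD (pre.length + 1) 0 = y := by
      simpa using pv_getD_append pre (cur :: y :: ys) 1
    rw [h1, h2]
    by_cases hk : cur + y ≤ k
    · rw [if_pos hk]
      rw [pv_set_append pre (y :: ys) cur (cur + y), pv_eraseIdx_append]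
      rw [ih pre (cur + y)]
      rw [calLoopB, if_pos hk]
    · rw [if_neg hk]
      have : pre.length + 1 = (pre ++ [cur]).length := by simp
      rw [this]
      have hassoc : pre ++ cur :: y :: ys = (pre ++ [cur]) ++ y :: ys := by simp
      rw [hassoc, ih (pre ++ [cur]) y]
      rw [calLoopB, if_neg hk]

-- ===== VERDICT (by name: the statement is the Claim_ definition above) =====
theorem cal_interval2_spec : Claim_equal_cal_interval2 := by
  intro li k _
  unfold Spec_cal_interval2 cal_interval2 cal_interval2_alt
  cases li with
  | nil => rw [calLoopA]; simp
  | cons x xs => simpa using pv_loop_eq k xs [] x
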